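-- pv_equiv track=rewrite | github.com/Kesze2006/python-22 | Óra/GUI proba.py | eltol
-- ===== SOURCE A (Python) =====
-- def eltol(pontok,x,y):
--     vissza=[]
--     for i, pont in enumerate(pontok):
--         if i%2==1:
--             vissza.append(pont+y)
--         else:
--             vissza.append(pont+x)
--     return vissza
-- ===== SOURCE B (Python) =====
-- def eltol(pontok, x, y):
--     vissza = [None] * len(pontok)
--     vissza[::2] = [p + x for p in pontok[::2]]
--     vissza[1::2] = [p + y for p in pontok[1::2]]
--     return vissza
-- ===== Notes on version B (the rewrite author's own statement) =====
-- stated objective: alternative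
-- what changed: Replaces the single enumerate loop with an i%2 branch by two branch-free slice passes: even-indexed slice shifted by x and odd-indexed slice shifted by y, written into a preallocated list via slice assignment.
import Mathlib
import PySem

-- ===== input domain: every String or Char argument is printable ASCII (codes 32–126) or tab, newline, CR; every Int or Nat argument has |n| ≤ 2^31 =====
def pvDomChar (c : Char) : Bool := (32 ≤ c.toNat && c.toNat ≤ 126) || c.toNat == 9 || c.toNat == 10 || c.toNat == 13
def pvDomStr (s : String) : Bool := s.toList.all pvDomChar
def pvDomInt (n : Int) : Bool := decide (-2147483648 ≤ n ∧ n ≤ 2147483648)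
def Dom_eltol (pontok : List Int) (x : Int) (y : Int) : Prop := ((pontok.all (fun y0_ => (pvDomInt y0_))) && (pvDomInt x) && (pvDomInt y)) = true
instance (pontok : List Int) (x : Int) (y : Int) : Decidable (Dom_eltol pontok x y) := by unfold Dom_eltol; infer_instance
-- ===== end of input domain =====

-- B replaces A's enumerate loop with its i%2 branch by two branch-free slice passes
-- (evens shifted by x, odds shifted by y) interleaved back; objective: alternative, same cost.

-- ===== PORT A =====
-- for i, pont in enumerate(pontok): if i%2==1: append(pont+y) else: append(pont+x)
def eltol (pontok : List Int) (x : Int) (y : Int) : List Int :=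
  (PySem.List.enumerate pontok 0).foldl
    (fun vissza ip => vissza ++ [if ip.1 % 2 == 1 then ip.2 + y else ip.2 + x]) []

-- ===== PORT B =====
-- pontok[::2] / pontok[1::2]: every second element starting at the head
def pvEveryOther : List Int → List Int
  | [] => []
  | [a] => [a]
  | a :: _ :: rest => a :: pvEveryOther rest

-- slice assignment vissza[::2]=evens; vissza[1::2]=odds on the preallocated list:
-- the result interleaves the two slices (evens has equal or one more element)
def pvInterleave : List Int → List Int → List Int
  | [], _ => []
  | e :: es, os => e :: pvInterleave os es
termination_by a b => a.length + b.length
decreasing_by simp; omega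

def eltol_alt (pontok : List Int) (x : Int) (y : Int) : List Int :=
  pvInterleave ((pvEveryOther pontok).map (· + x)) ((pvEveryOther pontok.tail).map (· + y))

-- ===== PRECONDITION & SPEC =====
def Spec_eltol (pontok : List Int) (x : Int) (y : Int) (out : List Int) : Prop := out = eltol_alt pontok x y
instance (pontok : List Int) (x : Int) (y : Int) (out : List Int) : Decidable (Spec_eltol pontok x y out) := by unfold Spec_eltol; infer_instance

-- ===== CLAIM (what is proved, stated in full; the proofs are below) =====
def Claim_equal_eltol : Prop := ∀ (pontok : List Int) (x : Int) (y : Int), Dom_eltol pontok x y → Spec_eltol pontok x y (eltol pontok x y)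

-- ===== LEMMAS AND PROOFS =====

lemma pvEveryOther_cons_tail (a : Int) (rest : List Int) :
    pvEveryOther (a :: rest) = a :: pvEveryOther rest.tail := by
  cases rest <;> simp [pvEveryOther]

lemma eltol_key (x y : Int) (pontok : List Int) : ∀ s : Int,
    ((s % 2 = 0 → (PySem.List.enumerate pontok s).map
        (fun ip => if ip.1 % 2 == 1 then ip.2 + y else ip.2 + x)
      = pvInterleave ((pvEveryOther pontok).map (· + x)) ((pvEveryOther pontok.tail).map (· + y)))
     ∧ (s % 2 = 1 → (PySem.List.enumerate pontok s).map
        (fun ip => if ip.1 % 2 == 1 then ip.2 + y else ip.2 + x)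
      = pvInterleave ((pvEveryOther pontok).map (· + y)) ((pvEveryOther pontok.tail).map (· + x)))) := by
  induction pontok with
  | nil => intro s; simp [PySem.List.enumerate_nil, pvEveryOther, pvInterleave]
  | cons a rest ih =>
    intro s
    have hs1 : (s + 1) % 2 = 1 ∨ (s + 1) % 2 = 0 := by omega
    constructor
    · intro hs
      have h1 : (s + 1) % 2 = 1 := by omega
      have hne : ¬ (s % 2 == 1) = true := by simp; omega
      simp only [PySem.List.enumerate_cons, pvEveryOther_cons_tail, List.tail_cons,
        List.map_cons, pvInterleave, hne, List.cons.injEq]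
      exact ⟨by simp, (ih (s + 1)).2 h1⟩
    · intro hs
      have h0 : (s + 1) % 2 = 0 := by omega
      have he : (s % 2 == 1) = true := by simp; omega
      simp only [PySem.List.enumerate_cons, pvEveryOther_cons_tail, List.tail_cons,
        List.map_cons, pvInterleave, he, if_pos, List.cons.injEq, true_and]
      exact (ih (s + 1)).1 h0

-- ===== VERDICT (by name: the statement is the Claim_ definition above) =====
theorem eltol_spec : Claim_equal_eltol := by
  intro pontok x y _
  unfold Spec_eltol eltol eltol_alt
  rw [PySem.List.foldl_append_singleton_eq_map]
  simpa using (eltol_key x y pontok 0).1 rfl
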